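-- pv_equiv track=rewrite | github.com/imankhazrak/EHR-Agentic-AI | src/scripts/generate_clinician_case_studies.py | _flag_comorbidities
-- ===== SOURCE A (Python) =====
-- from typing import Any, Dict, List, Optional, Sequence
--
-- _DIABETES_PREFIXES = ("250",)
--
-- _OBESITY_CODES_PREFIX = ("2780", "27800", "27801", "27802")
--
-- _DYSLIPIDEMIA_PREFIXES = ("272",)
--
-- _HTN_PREFIXES = ("401", "402", "403", "404", "405")
--
-- _ISCHEMIC_HEART_PREFIXES = ("410", "411", "412", "413", "414")
--
-- _CHF_PREFIXES = ("428",)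
--
-- _ATHERO_PREFIXES = ("440",)
--
-- def _code_prefix5(code: str) -> str:
--     """First 3–5 chars for numeric ICD-9 codes (handles 99662 style)."""
--     return "".join(c for c in code if c.isdigit())[:5]
--
-- def _flag_comorbidities(codes: Sequence[str]) -> Dict[str, bool]:
--     """Rule-based flags from ICD-9 diagnosis codes (coarse, for case narratives)."""
--     diabetes = obesity = dyslipidemia = htn = ihd = chf = athero = False
--     for raw in codes:
--         c = _code_prefix5(raw)
--         if not c:
--             continue
--         if c.startswith(_DIABETES_PREFIXES):
--             diabetes = True
--         if any(c.startswith(p) for p in _OBESITY_CODES_PREFIX):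
--             obesity = True
--         if any(c.startswith(p) for p in _DYSLIPIDEMIA_PREFIXES):
--             dyslipidemia = True
--         if any(c.startswith(p) for p in _HTN_PREFIXES):
--             htn = True
--         if any(c.startswith(p) for p in _ISCHEMIC_HEART_PREFIXES):
--             ihd = True
--         if any(c.startswith(p) for p in _CHF_PREFIXES):
--             chf = True
--         if any(c.startswith(p) for p in _ATHERO_PREFIXES):
--             athero = True
--     cvd = ihd or chf or athero
--     metabolic_cluster = sum([diabetes, obesity, dyslipidemia, htn]) >= 3
--     return {
--         "diabetes": diabetes,
--         "obesity": obesity,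
--         "dyslipidemia_icd": dyslipidemia,
--         "hypertension": htn,
--         "ischemic_heart": ihd,
--         "chf": chf,
--         "atherosclerosis": athero,
--         "cardiovascular_burden": cvd,
--         "metabolic_syndrome_pattern": metabolic_cluster,
--     }
-- ===== SOURCE B (Python) =====
-- _CATEGORIES = (
--     ("diabetes", ("250",)),
--     ("obesity", ("2780", "27800", "27801", "27802")),
--     ("dyslipidemia_icd", ("272",)),
--     ("hypertension", ("401", "402", "403", "404", "405")),
--     ("ischemic_heart", ("410", "411", "412", "413", "414")),
--     ("chf", ("428",)),
--     ("atherosclerosis", ("440",)),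
-- )
--
-- def _flag_comorbidities(codes):
--     """Table-driven flags: normalise all codes once, then one any() scan per category."""
--     processed = ["".join(ch for ch in raw if ch.isdigit())[:5] for raw in codes]
--     flags = {name: any(pc.startswith(prefixes) for pc in processed)
--              for name, prefixes in _CATEGORIES}
--     flags["cardiovascular_burden"] = (
--         flags["ischemic_heart"] or flags["chf"] or flags["atherosclerosis"]
--     )
--     flags["metabolic_syndrome_pattern"] = (
--         flags["diabetes"] + flags["obesity"]
--         + flags["dyslipidemia_icd"] + flags["hypertension"]
--     ) >= 3
--     return flags
-- ===== Notes on version B (the rewrite author's own statement) =====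
-- stated objective: simpler
-- what changed: Replaces the single loop that mutates seven boolean variables with a data-driven table of (flag, prefixes) categories: codes are normalised once, each flag is one any() scan over the precomputed list, and the two derived flags are computed from the dict.
import Mathlib
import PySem

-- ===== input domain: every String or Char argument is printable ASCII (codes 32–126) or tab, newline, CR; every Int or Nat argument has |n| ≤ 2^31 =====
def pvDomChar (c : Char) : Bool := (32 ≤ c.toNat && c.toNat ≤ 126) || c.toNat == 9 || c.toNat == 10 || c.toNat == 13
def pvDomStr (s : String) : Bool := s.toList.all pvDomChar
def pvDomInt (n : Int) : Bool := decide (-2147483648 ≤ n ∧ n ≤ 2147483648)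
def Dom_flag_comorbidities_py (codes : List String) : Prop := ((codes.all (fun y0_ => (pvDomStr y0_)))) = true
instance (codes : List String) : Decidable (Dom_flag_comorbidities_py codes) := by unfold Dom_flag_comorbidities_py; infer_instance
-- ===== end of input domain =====

-- B replaces A's single loop mutating seven booleans by a table of (flag, prefixes)
-- categories: codes normalised once, one any-scan per category (objective: simpler).


-- ===== PORT A =====
-- _code_prefix5: digits of the code, first 5
def pvCodePrefix5 (code : String) : String :=
  String.ofList ((code.toList.filter (fun ch => PySem.Chars.isdigit ch)).take 5)

-- loop body of A: update the seven flags from one raw code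
def pvStepA (s : Bool × Bool × Bool × Bool × Bool × Bool × Bool) (raw : String) :
    Bool × Bool × Bool × Bool × Bool × Bool × Bool :=
  let c := pvCodePrefix5 raw
  if c.toList = [] then s else
  ⟨s.1 || ["250"].any (fun p => PySem.Str.startswith c p),
   s.2.1 || ["2780", "27800", "27801", "27802"].any (fun p => PySem.Str.startswith c p),
   s.2.2.1 || ["272"].any (fun p => PySem.Str.startswith c p),
   s.2.2.2.1 || ["401", "402", "403", "404", "405"].any (fun p => PySem.Str.startswith c p),
   s.2.2.2.2.1 || ["410", "411", "412", "413", "414"].any (fun p => PySem.Str.startswith c p),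
   s.2.2.2.2.2.1 || ["428"].any (fun p => PySem.Str.startswith c p),
   s.2.2.2.2.2.2 || ["440"].any (fun p => PySem.Str.startswith c p)⟩

def flag_comorbidities_py (codes : List String) : List (String × Bool) :=
  match codes.foldl pvStepA ⟨false, false, false, false, false, false, false⟩ with
  | (diabetes, obesity, dyslipidemia, htn, ihd, chf, athero) =>
    let cvd := ihd || chf || athero
    let metabolic := decide (((if diabetes then (1 : Int) else 0) + (if obesity then 1 else 0)
      + (if dyslipidemia then 1 else 0) + (if htn then 1 else 0)) ≥ 3)
    [("diabetes", diabetes), ("obesity", obesity), ("dyslipidemia_icd", dyslipidemia),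
     ("hypertension", htn), ("ischemic_heart", ihd), ("chf", chf),
     ("atherosclerosis", athero), ("cardiovascular_burden", cvd),
     ("metabolic_syndrome_pattern", metabolic)]

-- ===== PORT B =====
def pvCategories : List (String × List String) :=
  [("diabetes", ["250"]),
   ("obesity", ["2780", "27800", "27801", "27802"]),
   ("dyslipidemia_icd", ["272"]),
   ("hypertension", ["401", "402", "403", "404", "405"]),
   ("ischemic_heart", ["410", "411", "412", "413", "414"]),
   ("chf", ["428"]),
   ("atherosclerosis", ["440"])]

def flag_comorbidities_py_alt (codes : List String) : List (String × Bool) :=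
  let processed := codes.map (fun raw =>
    String.ofList ((raw.toList.filter (fun ch => PySem.Chars.isdigit ch)).take 5))
  let flags : PySem.Dict String Bool := PySem.Dict.ofList (pvCategories.map (fun cat =>
    (cat.1, processed.any (fun pc => cat.2.any (fun p => PySem.Str.startswith pc p)))))
  let flags := flags.insert "cardiovascular_burden"
    (flags.getD "ischemic_heart" false || flags.getD "chf" false ||
     flags.getD "atherosclerosis" false)
  let flags := flags.insert "metabolic_syndrome_pattern"
    (decide (((if flags.getD "diabetes" false then (1 : Int) else 0)
      + (if flags.getD "obesity" false then 1 else 0)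
      + (if flags.getD "dyslipidemia_icd" false then 1 else 0)
      + (if flags.getD "hypertension" false then 1 else 0)) ≥ 3))
  flags.items

-- ===== PRECONDITION & SPEC =====
def Spec_flag_comorbidities_py (codes : List String) (out : List (String × Bool)) : Prop := out = flag_comorbidities_py_alt codes
instance (codes : List String) (out : List (String × Bool)) : Decidable (Spec_flag_comorbidities_py codes out) := by unfold Spec_flag_comorbidities_py; infer_instance

-- ===== CLAIM (what is proved, stated in full; the proofs are below) =====
def Claim_equal_flag_comorbidities_py : Prop := ∀ (codes : List String), Dom_flag_comorbidities_py codes → Spec_flag_comorbidities_py codes (flag_comorbidities_py codes)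

-- ===== LEMMAS AND PROOFS =====
-- "raw hits one of these prefixes" (after digit-normalisation)
def pvCatFlag (prefs : List String) (raw : String) : Bool :=
  prefs.any (fun p => PySem.Str.startswith (pvCodePrefix5 raw) p)

-- "does this list of codes hit one of these prefixes"
def pvHit (prefs : List String) (codes : List String) : Bool :=
  codes.any (fun raw => pvCatFlag prefs raw)

lemma pv_startswith_empty (s p : String) (hs : s.toList = []) (hp : p.toList ≠ []) :
    PySem.Str.startswith s p = false := by
  rw [Bool.eq_false_iff]
  intro h
  have h2 : PySem.Chars.startswith s.toList p.toList = true := by simpa using h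
  have h3 := (PySem.Chars.startswith_iff _ _).mp h2
  rw [hs] at h3
  exact hp (List.prefix_nil.mp h3)

lemma pv_any_startswith_empty (s : String) (hs : s.toList = []) (prefs : List String)
    (hp : ∀ p ∈ prefs, p.toList ≠ []) :
    (prefs.any (fun p => PySem.Str.startswith s p)) = false := by
  rw [Bool.eq_false_iff]
  intro h
  obtain ⟨p, hpm, hsw⟩ := List.any_eq_true.mp h
  rw [pv_startswith_empty s p hs (hp p hpm)] at hsw
  exact Bool.false_ne_true hsw

lemma pv_stepA_eq (s : Bool × Bool × Bool × Bool × Bool × Bool × Bool) (raw : String) :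
    pvStepA s raw =
      ⟨s.1 || pvCatFlag ["250"] raw,
       s.2.1 || pvCatFlag ["2780", "27800", "27801", "27802"] raw,
       s.2.2.1 || pvCatFlag ["272"] raw,
       s.2.2.2.1 || pvCatFlag ["401", "402", "403", "404", "405"] raw,
       s.2.2.2.2.1 || pvCatFlag ["410", "411", "412", "413", "414"] raw,
       s.2.2.2.2.2.1 || pvCatFlag ["428"] raw,
       s.2.2.2.2.2.2 || pvCatFlag ["440"] raw⟩ := by
  simp only [pvStepA, pvCatFlag]
  by_cases hx : (pvCodePrefix5 raw).toList = []
  · rw [if_pos hx,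
      pv_any_startswith_empty _ hx _ (by decide), pv_any_startswith_empty _ hx _ (by decide),
      pv_any_startswith_empty _ hx _ (by decide), pv_any_startswith_empty _ hx _ (by decide),
      pv_any_startswith_empty _ hx _ (by decide), pv_any_startswith_empty _ hx _ (by decide),
      pv_any_startswith_empty _ hx _ (by decide)]
    simp
  · rw [if_neg hx]

lemma pv_foldA_eq (codes : List String) (d o dy h i c a : Bool) :
    codes.foldl pvStepA ⟨d, o, dy, h, i, c, a⟩ =
      ⟨d || pvHit ["250"] codes,
       o || pvHit ["2780", "27800", "27801", "27802"] codes,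
       dy || pvHit ["272"] codes,
       h || pvHit ["401", "402", "403", "404", "405"] codes,
       i || pvHit ["410", "411", "412", "413", "414"] codes,
       c || pvHit ["428"] codes,
       a || pvHit ["440"] codes⟩ := by
  induction codes generalizing d o dy h i c a with
  | nil => simp [pvHit]
  | cons x xs ih =>
    rw [List.foldl_cons, pv_stepA_eq, ih]
    simp [pvHit, Bool.or_assoc]

theorem flag_comorbidities_py_spec : Claim_equal_flag_comorbidities_py := by
  intro codes _
  show flag_comorbidities_py codes = flag_comorbidities_py_alt codes
  rw [flag_comorbidities_py, pv_foldA_eq]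
  simp [flag_comorbidities_py_alt, pvCategories, PySem.Dict.ofList, PySem.Dict.update,
    PySem.Dict.insert, PySem.Dict.getD, PySem.Dict.get?, PySem.Dict.empty,
    PySem.Dict.contains, List.any_map, Function.comp_def,
    pvHit, pvCatFlag, pvCodePrefix5]
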